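-- pv_equiv track=rewrite | github.com/ghostrider77/BioinformaticsProblems | Python/textbook_track/chapter09/ba9m.py | calc_first_occurrences
-- ===== SOURCE A (Python) =====
-- from collections import Counter
--
-- def calc_first_occurrences(transformed_string):
--     letter_counts = Counter(transformed_string)
--     first_occurrence = {}
--     ix = 0
--     for letter in sorted(letter_counts.keys()):
--         first_occurrence[letter] = ix
--         ix += letter_counts[letter]
--     return first_occurrence
-- ===== SOURCE B (Python) =====
-- def calc_first_occurrences(transformed_string):
--     return {letter: sum(c < letter for c in transformed_string)
--             for letter in sorted(set(transformed_string))}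
-- ===== Notes on version B (the rewrite author's own statement) =====
-- stated objective: simpler
-- what changed: Replaces the Counter-plus-running-prefix-sum loop by a direct closed form: each distinct letter's first occurrence in the sorted string is the number of characters strictly smaller than it, computed per letter in a comprehension.
import Mathlib
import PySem

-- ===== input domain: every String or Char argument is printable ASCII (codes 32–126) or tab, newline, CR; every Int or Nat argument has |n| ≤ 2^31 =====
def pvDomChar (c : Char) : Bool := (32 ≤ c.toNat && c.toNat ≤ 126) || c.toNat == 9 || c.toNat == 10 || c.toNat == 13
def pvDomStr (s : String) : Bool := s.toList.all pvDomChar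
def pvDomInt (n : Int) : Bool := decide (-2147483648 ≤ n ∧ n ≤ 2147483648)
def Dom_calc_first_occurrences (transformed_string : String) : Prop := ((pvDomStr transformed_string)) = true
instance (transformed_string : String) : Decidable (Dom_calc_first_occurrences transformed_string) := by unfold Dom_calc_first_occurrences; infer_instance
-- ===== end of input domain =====

-- B replaces A's Counter-plus-running-prefix-sum loop by a per-letter closed form:
-- first_occurrence[letter] = number of characters strictly smaller than letter (simpler decomposition).


-- ===== PORT A =====
def calc_first_occurrences (transformed_string : String) : List (String × Int) :=
  let letter_counts : PySem.Dict String Int :=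
    PySem.Dict.counter (transformed_string.toList.map (fun c => String.ofList [c]))
  ((PySem.List.sorted letter_counts.keys (fun x => x) false).foldl
      (fun (st : PySem.Dict String Int × Int) letter =>
        (st.1.insert letter st.2, st.2 + letter_counts.getD letter 0))
      (PySem.Dict.empty, 0)).1.items

-- ===== PORT B =====
-- dict comprehension over sorted(set(s)): the keys are distinct, so its items are exactly
-- this map in iteration order (exact here); sum(c < letter for c in s) is the countP.
def calc_first_occurrences_alt (transformed_string : String) : List (String × Int) :=
  let chars := transformed_string.toList.map (fun c => String.ofList [c])
  (PySem.List.sorted (PySem.Set.ofList chars) (fun x => x) false).map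
    (fun letter => (letter, (chars.countP (fun c => decide (c < letter)) : Int)))

-- ===== PRECONDITION & SPEC =====
def Spec_calc_first_occurrences (transformed_string : String) (out : List (String × Int)) : Prop := out = calc_first_occurrences_alt transformed_string
instance (transformed_string : String) (out : List (String × Int)) : Decidable (Spec_calc_first_occurrences transformed_string out) := by unfold Spec_calc_first_occurrences; infer_instance

-- ===== CLAIM (what is proved, stated in full; the proofs are below) =====
def Claim_equal_calc_first_occurrences : Prop := ∀ (transformed_string : String), Dom_calc_first_occurrences transformed_string → Spec_calc_first_occurrences transformed_string (calc_first_occurrences transformed_string)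

-- ===== LEMMAS AND PROOFS =====

-- the list A's loop builds: keys in order with running prefix sums of counts `c`.
def pvBuildA (c : String → Int) (ks : List String) (ix : Int) : List (String × Int) :=
  match ks with
  | [] => []
  | k :: t => (k, ix) :: pvBuildA c t (ix + c k)

theorem pvBuildA_congr (c c' : String → Int) (ks : List String) (ix : Int)
    (h : ∀ k ∈ ks, c k = c' k) : pvBuildA c ks ix = pvBuildA c' ks ix := by
  induction ks generalizing ix with
  | nil => rfl
  | cons k t ih =>
      simp only [pvBuildA, h k (by simp)]
      exact congrArg _ (ih _ (fun k hk => h k (by simp [hk])))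

-- A's loop over fresh distinct keys appends (k, running ix) pairs.
theorem pv_foldA (c : String → Int) : ∀ (ks : List String) (d : PySem.Dict String Int) (ix : Int),
    ks.Nodup → (∀ k ∈ ks, d.contains k = false) →
    ((ks.foldl (fun (st : PySem.Dict String Int × Int) letter =>
        (st.1.insert letter st.2, st.2 + c letter)) (d, ix)).1).items
      = d.items ++ pvBuildA c ks ix := by
  intro ks
  induction ks with
  | nil => intro d ix _ _; simp [pvBuildA]
  | cons k t ih =>
      intro d ix hnd hfresh
      have hk : d.contains k = false := hfresh k (by simp)
      have hstep : ∀ k' ∈ t, (d.insert k ix).contains k' = false := by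
        intro k' hk'
        rw [PySem.Dict.contains_insert]
        have h1 : k' ≠ k := fun h => (List.nodup_cons.1 hnd).1 (h ▸ hk')
        simp [h1, hfresh k' (by simp [hk'])]
      simp only [List.foldl_cons]
      rw [ih (d.insert k ix) (ix + c k) (List.nodup_cons.1 hnd).2 hstep]
      rw [PySem.Dict.items_insert_of_not_contains _ _ hk]
      simp [pvBuildA]

-- a countP split along a pointwise 0/1 decomposition of the predicate
theorem pv_countP_add (L : List String) (p q r : String → Bool)
    (h : ∀ x ∈ L, (if p x then (1:Nat) else 0) = (if q x then 1 else 0) + (if r x then 1 else 0)) :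
    L.countP p = L.countP q + L.countP r := by
  induction L with
  | nil => simp
  | cons a t ih =>
      simp only [List.countP_cons]
      have ha := h a (by simp)
      have ht := ih (fun x hx => h x (by simp [hx]))
      omega

-- MAIN: A's prefix-sum build over a strictly sorted key list equals the closed form
-- "number of characters smaller than the key", given the stated invariant.
theorem pv_build_eq_map (L : List String) : ∀ (ks : List String) (ix : Int),
    ks.Pairwise (· < ·) →
    (∀ x ∈ L, x ∈ ks ∨ ∀ k ∈ ks, x < k) →
    ix = (L.countP (fun x => !decide (x ∈ ks)) : Int) →
    pvBuildA (fun k => (L.count k : Int)) ks ix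
      = ks.map (fun k => (k, (L.countP (fun c => decide (c < k)) : Int))) := by
  intro ks
  induction ks with
  | nil => intro ix _ _ _; rfl
  | cons a t ih =>
      intro ix hp hmem hix
      have hpc := List.pairwise_cons.1 hp
      have hat : a ∉ t := fun h => lt_irrefl a (hpc.1 a h)
      have hhead : L.countP (fun x => !decide (x ∈ a :: t)) = L.countP (fun c => decide (c < a)) := by
        apply List.countP_congr
        intro x hx
        by_cases hxm : x ∈ a :: t
        · rcases List.mem_cons.1 hxm with rfl | hxt
          · simp [hxm]
          · have : a < x := hpc.1 x hxt
            simp [hxm, not_lt_of_gt this]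
        · have hlt : x < a := by
            rcases hmem x hx with hin | hall
            · exact absurd hin hxm
            · exact hall a (by simp)
          simp [hxm, hlt]
      have hstep : L.countP (fun x => !decide (x ∈ t))
          = L.countP (fun x => !decide (x ∈ a :: t)) + L.countP (fun x => x == a) := by
        apply pv_countP_add
        intro x hx
        by_cases hxa : x = a
        · subst hxa
          simp [hat]
        · have hmemiff : (x ∈ t) ↔ (x ∈ a :: t) := by
            constructor
            · intro h; exact List.mem_cons.2 (Or.inr h)
            · intro h; rcases List.mem_cons.1 h with h' | h'
              · exact absurd h' hxa
              · exact h'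
          by_cases hxt : x ∈ t
          · simp [hxt, hmemiff.1 hxt, hxa]
          · simp [hxt, hxa]
      have hcount : L.countP (fun x => x == a) = L.count a := rfl
      simp only [pvBuildA, List.map_cons]
      have hixa : ix = (L.countP (fun c => decide (c < a)) : Int) := by
        rw [hix, hhead]
      rw [ih (ix + (L.count a : Int)) hpc.2 ?_ ?_, hixa]
      · intro x hx
        rcases hmem x hx with hin | hall
        · rcases List.mem_cons.1 hin with rfl | hxt
          · exact Or.inr (fun k hk => hpc.1 k hk)
          · exact Or.inl hxt
        · exact Or.inr (fun k hk => hall k (by simp [hk]))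
      · rw [hix, hstep, hcount]
        push_cast
        ring

-- ===== VERDICT (by name: the statement is the Claim_ definition above) =====
theorem calc_first_occurrences_spec : Claim_equal_calc_first_occurrences := by
  intro s _
  unfold Spec_calc_first_occurrences calc_first_occurrences calc_first_occurrences_alt
  set L := s.toList.map (fun c => String.ofList [c]) with hL
  rw [pv_foldA (fun letter => (PySem.Dict.counter L).getD letter 0) _ _ _
      (by
        rw [PySem.Dict.keys_counter]
        exact ((PySem.List.sorted_perm _ _ _).nodup_iff).2 (PySem.Set.nodup_ofList L))
      (by intro k _; exact PySem.Dict.contains_empty k)]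
  have hie : (PySem.Dict.empty : PySem.Dict String Int).items = [] := rfl
  rw [hie, List.nil_append, PySem.Dict.keys_counter]
  rw [pvBuildA_congr _ (fun k => (L.count k : Int)) _ _ (fun k _ => by
    rw [PySem.Dict.getD_counter])]
  refine pv_build_eq_map L _ 0 ?_ ?_ ?_
  · exact PySem.List.sorted_ofList_pairwise_lt L
  · intro x hx
    exact Or.inl ((PySem.List.mem_sorted _ _ _ _).2 ((PySem.Set.mem_ofList L x).2 hx))
  · have : L.countP (fun x => !decide (x ∈ PySem.List.sorted (PySem.Set.ofList L) (fun x => x) false)) = 0 := by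
      apply List.countP_eq_zero.2
      intro x hx
      simp [(PySem.List.mem_sorted _ _ _ _).2 ((PySem.Set.mem_ofList L x).2 hx)]
    rw [this]
    rfl
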